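-- pv_equiv track=rewrite | github.com/supuntharindu123/AIResumeAnalyzer | ai-service/app.py | check_length_and_structure
-- ===== SOURCE A (Python) =====
-- def check_length_and_structure(resume_text):
--     """Check resume length and overall structure."""
--     issues = []
--
--     # Word count check
--     word_count = len(resume_text.split())
--
--     if word_count < 200:
--         issues.append("Resume appears too short - add more detail about your experience")
--     elif word_count > 1000:
--         issues.append("Resume may be too long - consider condensing to 1-2 pages")
--
--     # Line length check (for readability)
--     lines = resume_text.split('\n')
--     long_lines = [line for line in lines if len(line) > 100]
--
--     if len(long_lines) > len(lines) * 0.3: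
--         issues.append("Some lines are too long - break into shorter, readable chunks")
--
--     # Check for empty lines (spacing issues)
--     empty_lines = sum(1 for line in lines if not line.strip())
--     if empty_lines > len(lines) * 0.4:
--         issues.append("Too many empty lines - optimize spacing for better readability")
--
--     return issues
-- ===== SOURCE B (Python) =====
-- def check_length_and_structure(resume_text):
--     """Check resume length and overall structure.
--
--     Single character-level scan (a small automaton) instead of splitting the
--     text: tracks word starts, newline count, current line length and blankness.
--     """
--     words = 0          # words counted at their first character
--     n_lines = 1        # lines = newlines + 1
--     long_lines = 0
--     empty_lines = 0
--     in_word = False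
--     line_len = 0
--     line_blank = True
--     for ch in resume_text:
--         if ch == '\n':
--             if line_len > 100:
--                 long_lines += 1
--             if line_blank:
--                 empty_lines += 1
--             n_lines += 1
--             line_len = 0
--             line_blank = True
--             in_word = False
--         else:
--             line_len += 1
--             if ch.isspace():
--                 in_word = False
--             else:
--                 line_blank = False
--                 if not in_word:
--                     words += 1
--                 in_word = True
--     if line_len > 100:
--         long_lines += 1
--     if line_blank:
--         empty_lines += 1
--
--     issues = []
--     if words < 200:
--         issues.append("Resume appears too short - add more detail about your experience")
--     elif words > 1000:
--         issues.append("Resume may be too long - consider condensing to 1-2 pages")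
--     if long_lines > n_lines * 0.3:
--         issues.append("Some lines are too long - break into shorter, readable chunks")
--     if empty_lines > n_lines * 0.4:
--         issues.append("Too many empty lines - optimize spacing for better readability")
--     return issues
-- ===== Notes on version B (the rewrite author's own statement) =====
-- stated objective: alternative
-- what changed: Replaces A's split-based passes (a global whitespace split, a split into lines, then a filter and a count over the line list) with a single character-level automaton over the raw text that tracks word starts, newline count, current line length and current line blankness; the threshold branches and messages are unchanged.
import Mathlib
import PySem

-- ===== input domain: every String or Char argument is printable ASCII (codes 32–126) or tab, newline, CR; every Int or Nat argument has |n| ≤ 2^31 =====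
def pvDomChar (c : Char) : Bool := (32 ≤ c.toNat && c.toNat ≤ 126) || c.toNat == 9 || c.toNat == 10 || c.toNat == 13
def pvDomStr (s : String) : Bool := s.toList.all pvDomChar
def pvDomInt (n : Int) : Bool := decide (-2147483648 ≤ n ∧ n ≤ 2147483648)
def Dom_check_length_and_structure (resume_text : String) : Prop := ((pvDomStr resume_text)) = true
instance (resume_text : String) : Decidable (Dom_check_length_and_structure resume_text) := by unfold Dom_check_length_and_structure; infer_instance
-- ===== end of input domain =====

-- B replaces A's split-based passes (a global whitespace split plus passes over the line list)
-- with a single character-level automaton over the raw text; same messages, same order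
-- (objective: alternative algorithm, same asymptotic cost).
-- Python's float thresholds `> len(lines)*0.3` / `> len(lines)*0.4` are ported in BOTH ports as the
-- exact integer comparisons 10·x > 3·n / 5·x > 2·n.

-- ===== PORT A =====
def check_length_and_structure (resume_text : String) : List String :=
  let issues : List String := []
  let word_count : Nat := (PySem.Str.split₀ resume_text).length
  let issues :=
    if word_count < 200 then
      issues ++ ["Resume appears too short - add more detail about your experience"]
    else if word_count > 1000 then
      issues ++ ["Resume may be too long - consider condensing to 1-2 pages"]
    else issues
  -- sep is the nonempty literal "\n", so split? is always `some`
  let lines : List String := (PySem.Str.split? resume_text "\n").getD []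
  let long_lines := lines.filter (fun line => PySem.Str.len line > 100)
  let issues :=
    if long_lines.length * 10 > lines.length * 3 then
      issues ++ ["Some lines are too long - break into shorter, readable chunks"]
    else issues
  let empty_lines := lines.foldl (fun acc line => if PySem.Str.strip line = "" then acc + 1 else acc) 0
  let issues :=
    if empty_lines * 5 > lines.length * 2 then
      issues ++ ["Too many empty lines - optimize spacing for better readability"]
    else issues
  issues

-- ===== PORT B =====
-- character-level automaton: state = (words, n_lines, long_lines, empty_lines, in_word, line_len, line_blank)
def check_length_and_structure_alt (resume_text : String) : List String :=
  let st := resume_text.toList.foldl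
    (fun (a : Nat × Nat × Nat × Nat × Bool × Nat × Bool) ch =>
      if ch = '\n' then
        (a.1, a.2.1 + 1,
         a.2.2.1 + (if a.2.2.2.2.2.1 > 100 then 1 else 0),
         a.2.2.2.1 + (if a.2.2.2.2.2.2 then 1 else 0),
         false, 0, true)
      else if PySem.Chars.isspace ch then
        (a.1, a.2.1, a.2.2.1, a.2.2.2.1, false, a.2.2.2.2.2.1 + 1, a.2.2.2.2.2.2)
      else
        (a.1 + (if a.2.2.2.2.1 then 0 else 1), a.2.1, a.2.2.1, a.2.2.2.1,
         true, a.2.2.2.2.2.1 + 1, false))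
    (0, 1, 0, 0, false, 0, true)
  let words := st.1
  let n_lines := st.2.1
  let long_lines := st.2.2.1 + (if st.2.2.2.2.2.1 > 100 then 1 else 0)
  let empty_lines := st.2.2.2.1 + (if st.2.2.2.2.2.2 then 1 else 0)
  let issues : List String :=
    if words < 200 then
      ["Resume appears too short - add more detail about your experience"]
    else if words > 1000 then
      ["Resume may be too long - consider condensing to 1-2 pages"]
    else []
  let issues :=
    if long_lines * 10 > n_lines * 3 then
      issues ++ ["Some lines are too long - break into shorter, readable chunks"]
    else issues
  let issues :=
    if empty_lines * 5 > n_lines * 2 then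
      issues ++ ["Too many empty lines - optimize spacing for better readability"]
    else issues
  issues

-- ===== PRECONDITION & SPEC =====
def Spec_check_length_and_structure (resume_text : String) (out : List String) : Prop := out = check_length_and_structure_alt resume_text
instance (resume_text : String) (out : List String) : Decidable (Spec_check_length_and_structure resume_text out) := by unfold Spec_check_length_and_structure; infer_instance

-- ===== CLAIM (what is proved, stated in full; the proofs are below) =====
def Claim_equal_check_length_and_structure : Prop := ∀ (resume_text : String), Dom_check_length_and_structure resume_text → Spec_check_length_and_structure resume_text (check_length_and_structure resume_text)

-- ===== LEMMAS AND PROOFS =====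

/-- Word counter: number of whitespace-separated words of `s`, given whether a word is open. -/
def pvWC : List Char → Bool → Nat
  | [], inw => if inw then 1 else 0
  | c :: rest, inw =>
      if PySem.Chars.isspace c then (if inw then 1 else 0) + pvWC rest false
      else pvWC rest true

/-- Word-START counter: words beginning strictly inside `s`, given whether a word is open. -/
def pvSC : List Char → Bool → Nat
  | [], _ => 0
  | c :: rest, inw =>
      if PySem.Chars.isspace c then pvSC rest false
      else (if inw then 0 else 1) + pvSC rest true

/-- Reference split of a char list at newlines. -/
def pvLines : List Char → List (List Char)
  | [] => [[]]
  | c :: rest =>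
      if c = '\n' then [] :: pvLines rest
      else
        match pvLines rest with
        | [] => [[c]]
        | h :: t => (c :: h) :: t

/-- Completed-long-line counter, given current line length. -/
def pvLONG : List Char → Nat → Nat
  | [], _ => 0
  | c :: r, ll => if c = '\n' then (if ll > 100 then 1 else 0) + pvLONG r 0 else pvLONG r (ll + 1)

/-- Final line length, given current line length. -/
def pvFLEN : List Char → Nat → Nat
  | [], ll => ll
  | c :: r, ll => if c = '\n' then pvFLEN r 0 else pvFLEN r (ll + 1)

/-- Completed-blank-line counter, given current blank flag. -/
def pvEMP : List Char → Bool → Nat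
  | [], _ => 0
  | c :: r, lb =>
      if c = '\n' then (if lb then 1 else 0) + pvEMP r true
      else pvEMP r (lb && PySem.Chars.isspace c)

/-- Final blank flag. -/
def pvFBL : List Char → Bool → Bool
  | [], lb => lb
  | c :: r, lb => if c = '\n' then pvFBL r true else pvFBL r (lb && PySem.Chars.isspace c)

/-- Final in-word flag. -/
def pvFINW : List Char → Bool → Bool
  | [], inw => inw
  | c :: r, _ => if PySem.Chars.isspace c then pvFINW r false else pvFINW r true

lemma pvLines_ne_nil (l : List Char) : pvLines l ≠ [] := by
  cases l with
  | nil => simp [pvLines]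
  | cons c rest =>
      simp only [pvLines]
      split
      · simp
      · split <;> simp

lemma split₀_go_length (s : List Char) : ∀ (cur : List Char) (acc : List (List Char)),
    (PySem.Chars.split₀.go s cur acc).length = acc.length + pvWC s (!cur.isEmpty) := by
  induction s with
  | nil =>
      intro cur acc
      simp only [PySem.Chars.split₀.go, pvWC]
      cases cur <;> simp
  | cons c rest ih =>
      intro cur acc
      simp only [PySem.Chars.split₀.go, pvWC]
      by_cases hs : PySem.Chars.isspace c
      · simp only [hs, if_true]
        cases cur with
        | nil => simp [ih]
        | cons x xs => simp [ih]; omega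
      · simp [hs, ih]

lemma split₀_length (s : List Char) : (PySem.Chars.split₀ s).length = pvWC s false := by
  simpa using split₀_go_length s [] []

lemma pvWC_eq_pvSC (s : List Char) : ∀ b : Bool, pvWC s b = pvSC s b + (if b then 1 else 0) := by
  induction s with
  | nil => intro b; simp [pvWC, pvSC]
  | cons c r ih =>
      intro b
      by_cases hs : PySem.Chars.isspace c
      · simp [pvWC, pvSC, hs, ih false]; cases b <;> simp <;> omega
      · simp [pvWC, pvSC, hs, ih true]; cases b <;> simp <;> omega

lemma splitOn_go_nl (fuel : Nat) : ∀ (l cur : List Char) (acc : List (List Char)),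
    l.length < fuel →
    PySem.Chars.splitOn.go ['\n'] fuel l cur acc =
      acc.reverse ++ (match pvLines l with
                      | [] => [cur.reverse]
                      | h :: t => (cur.reverse ++ h) :: t) := by
  induction fuel with
  | zero => intro l cur acc h; omega
  | succ fuel ih =>
      intro l cur acc h
      cases l with
      | nil =>
          simp [PySem.Chars.splitOn.go, pvLines]
      | cons c rest =>
          simp only [PySem.Chars.splitOn.go]
          by_cases hc : c = '\n'
          · subst hc
            rw [if_pos (by simp [List.isPrefixOf])]
            simp only [List.length_cons, List.length_nil, List.drop_succ_cons, List.drop_zero]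
            rw [ih rest [] ((cur.reverse) :: acc) (by simpa using Nat.lt_of_succ_lt_succ h)]
            simp only [pvLines, if_pos rfl]
            rcases hl : pvLines rest with _ | ⟨h1, t1⟩
            · exact absurd hl (pvLines_ne_nil rest)
            · simp
          · rw [if_neg (by simp [List.isPrefixOf]; exact fun hcc => hc hcc.symm)]
            rw [ih rest (c :: cur) acc (by simpa using Nat.lt_of_succ_lt_succ h)]
            simp only [pvLines, hc, if_false]
            rcases hl : pvLines rest with _ | ⟨h1, t1⟩
            · exact absurd hl (pvLines_ne_nil rest)
            · simp

lemma splitOn_nl (s : List Char) : PySem.Chars.splitOn s ['\n'] = pvLines s := by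
  unfold PySem.Chars.splitOn
  rw [splitOn_go_nl (s.length + 1) s [] [] (by omega)]
  rcases hl : pvLines s with _ | ⟨h1, t1⟩
  · exact absurd hl (pvLines_ne_nil s)
  · simp

lemma pvLines_length (s : List Char) : (pvLines s).length = s.count '\n' + 1 := by
  induction s with
  | nil => simp [pvLines]
  | cons c r ih =>
      by_cases hc : c = '\n'
      · subst hc; simp [pvLines, ih, List.count_cons]
      · simp only [pvLines, hc, if_false]
        rcases hl : pvLines r with _ | ⟨h1, t1⟩
        · exact absurd hl (pvLines_ne_nil r)
        · rw [hl] at ih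
          simp_all [List.count_cons, hc]

lemma long_spec (s : List Char) : ∀ (ll : Nat) (h : List Char) (t : List (List Char)),
    pvLines s = h :: t →
    (if ll + h.length > 100 then 1 else 0) + t.countP (fun l => decide (l.length > 100))
      = pvLONG s ll + (if pvFLEN s ll > 100 then 1 else 0) := by
  induction s with
  | nil =>
      intro ll h t hl
      simp only [pvLines] at hl
      cases hl
      simp [pvLONG, pvFLEN]
  | cons c r ih =>
      intro ll h t hl
      by_cases hc : c = '\n'
      · subst hc
        simp only [pvLines, if_pos rfl] at hl
        rcases hl2 : pvLines r with _ | ⟨h1, t1⟩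
        · exact absurd hl2 (pvLines_ne_nil r)
        · rw [hl2] at hl
          cases hl
          have := ih 0 _ _ hl2
          simp only [pvLONG, pvFLEN, if_pos rfl, if_true, List.countP_cons,
            Nat.zero_add, decide_eq_true_eq, List.length_nil, Nat.add_zero] at this ⊢
          split_ifs at this ⊢ <;> omega
      · simp only [pvLines, hc, if_false] at hl
        rcases hl2 : pvLines r with _ | ⟨h1, t1⟩
        · exact absurd hl2 (pvLines_ne_nil r)
        · rw [hl2] at hl
          cases hl
          have := ih (ll + 1) _ _ hl2
          simp only [pvLONG, pvFLEN, hc, if_false, List.length_cons,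
            decide_eq_true_eq] at this ⊢
          have harith : ll + (h1.length + 1) = ll + 1 + h1.length := by omega
          simp only [harith]
          omega

lemma emp_spec (s : List Char) : ∀ (lb : Bool) (h : List Char) (t : List (List Char)),
    pvLines s = h :: t →
    (if (lb && h.all PySem.Chars.isspace) then 1 else 0)
        + t.countP (fun l => l.all PySem.Chars.isspace)
      = pvEMP s lb + (if pvFBL s lb then 1 else 0) := by
  induction s with
  | nil =>
      intro lb h t hl
      simp only [pvLines] at hl
      cases hl
      simp [pvEMP, pvFBL]
  | cons c r ih =>
      intro lb h t hl
      by_cases hc : c = '\n'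
      · subst hc
        simp only [pvLines, if_pos rfl] at hl
        rcases hl2 : pvLines r with _ | ⟨h1, t1⟩
        · exact absurd hl2 (pvLines_ne_nil r)
        · rw [hl2] at hl
          cases hl
          have := ih true _ _ hl2
          simp only [pvEMP, pvFBL, if_pos rfl, if_true, List.countP_cons, List.all_nil, Bool.and_true,
            Bool.true_and] at *
          omega
      · simp only [pvLines, hc, if_false] at hl
        rcases hl2 : pvLines r with _ | ⟨h1, t1⟩
        · exact absurd hl2 (pvLines_ne_nil r)
        · rw [hl2] at hl
          cases hl
          have := ih (lb && PySem.Chars.isspace c) _ _ hl2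
          simp only [pvEMP, pvFBL, hc, if_false, List.all_cons, ← Bool.and_assoc] at this ⊢
          omega

lemma foldl_count (lines : List String) : ∀ acc : Nat,
    lines.foldl (fun acc line => if PySem.Str.strip line = "" then acc + 1 else acc) acc
      = acc + lines.countP (fun line => PySem.Str.strip line = "") := by
  induction lines with
  | nil => intro acc; simp
  | cons x xs ih =>
      intro acc
      simp only [List.foldl_cons, List.countP_cons, ih]
      split <;> simp_all <;> omega

lemma all_dropWhile (p : Char → Bool) (l : List Char) :
    ((l.dropWhile p).all p) = l.all p := by
  conv_rhs => rw [← List.takeWhile_append_dropWhile (p := p) (l := l)]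
  simp only [List.all_append]
  have : (l.takeWhile p).all p = true := by
    simp only [List.all_eq_true]
    exact fun x hx => List.mem_takeWhile_imp hx
  rw [this, Bool.true_and]

lemma strip_eq_nil_iff (l : List Char) :
    (PySem.Chars.strip l = []) ↔ l.all PySem.Chars.isspace = true := by
  unfold PySem.Chars.strip PySem.Chars.rstrip PySem.Chars.lstrip
  rw [List.reverse_eq_nil_iff, List.dropWhile_eq_nil_iff]
  constructor
  · intro hall
    rw [← all_dropWhile PySem.Chars.isspace l]
    simp only [List.all_eq_true]
    intro x hx
    exact hall x (by simpa using hx)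
  · intro hall x hx
    have := all_dropWhile PySem.Chars.isspace l
    rw [hall] at this
    simp only [List.all_eq_true] at this
    exact this x (by simpa using hx)

lemma strip_str_eq (l : List Char) :
    (decide (PySem.Str.strip (String.ofList l) = "")) = l.all PySem.Chars.isspace := by
  simp only [PySem.Str.strip, String.toList_ofList]
  rcases hb : l.all PySem.Chars.isspace with _ | _
  · simp only [decide_eq_false_iff_not]
    intro hcontra
    have : PySem.Chars.strip l = [] := by
      have := congrArg String.toList hcontra
      simpa using this
    rw [(strip_eq_nil_iff l).mp this] at hb
    exact absurd hb (by simp)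
  · have : PySem.Chars.strip l = [] := (strip_eq_nil_iff l).mpr hb
    simp [this]

/-- B's automaton fold, fully characterized. -/
lemma fold_spec (s : List Char) :
    ∀ (w n lg em : Nat) (inw : Bool) (ll : Nat) (lb : Bool),
    s.foldl
      (fun (a : Nat × Nat × Nat × Nat × Bool × Nat × Bool) ch =>
        if ch = '\n' then
          (a.1, a.2.1 + 1,
           a.2.2.1 + (if a.2.2.2.2.2.1 > 100 then 1 else 0),
           a.2.2.2.1 + (if a.2.2.2.2.2.2 then 1 else 0),
           false, 0, true)
        else if PySem.Chars.isspace ch then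
          (a.1, a.2.1, a.2.2.1, a.2.2.2.1, false, a.2.2.2.2.2.1 + 1, a.2.2.2.2.2.2)
        else
          (a.1 + (if a.2.2.2.2.1 then 0 else 1), a.2.1, a.2.2.1, a.2.2.2.1,
           true, a.2.2.2.2.2.1 + 1, false))
      (w, n, lg, em, inw, ll, lb)
    = (w + pvSC s inw, n + s.count '\n', lg + pvLONG s ll, em + pvEMP s lb,
       pvFINW s inw, pvFLEN s ll, pvFBL s lb) := by
  induction s with
  | nil => intro w n lg em inw ll lb; simp [pvSC, pvLONG, pvEMP, pvFINW, pvFLEN, pvFBL]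
  | cons c r ih =>
      intro w n lg em inw ll lb
      by_cases hc : c = '\n'
      · subst hc
        have hsp : PySem.Chars.isspace '\n' = true := by decide
        simp [List.foldl_cons, ih, pvSC, pvLONG, pvEMP, pvFINW, pvFLEN, pvFBL,
          List.count_cons, hsp, Prod.ext_iff]
        omega
      · by_cases hs : PySem.Chars.isspace c
        · simp [List.foldl_cons, hc, hs, ih, pvSC, pvLONG, pvEMP, pvFINW,
            pvFLEN, pvFBL, List.count_cons, Prod.ext_iff]
        · simp [List.foldl_cons, hc, hs, ih, pvSC, pvLONG, pvEMP, pvFINW,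
            pvFLEN, pvFBL, List.count_cons, Prod.ext_iff]
          cases inw <;> simp <;> omega

-- ===== VERDICT (by name: the statement is the Claim_ definition above) =====
theorem check_length_and_structure_spec : Claim_equal_check_length_and_structure := by
  intro s _
  unfold Spec_check_length_and_structure check_length_and_structure check_length_and_structure_alt
  simp only []
  rw [fold_spec]
  -- A's line list is pvLines s.toList
  have hsplit : (PySem.Str.split? s "\n").getD [] = (pvLines s.toList).map String.ofList := by
    simp [PySem.Str.split?, PySem.Chars.split?, splitOn_nl]
  rcases hl : pvLines s.toList with _ | ⟨h1, t1⟩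
  · exact absurd hl (pvLines_ne_nil s.toList)
  -- word count
  have hwc : (PySem.Str.split₀ s).length = pvSC s.toList false := by
    simp only [PySem.Str.split₀, List.length_map, split₀_length, pvWC_eq_pvSC]
    simp
  -- number of lines
  have hnl : ((PySem.Str.split? s "\n").getD []).length = s.toList.count '\n' + 1 := by
    rw [hsplit, List.length_map, pvLines_length]
  -- long-line count
  have hlong : (((PySem.Str.split? s "\n").getD []).filter
        (fun line => PySem.Str.len line > 100)).length
      = pvLONG s.toList 0 + (if pvFLEN s.toList 0 > 100 then 1 else 0) := by
    rw [hsplit, ← List.countP_eq_length_filter, List.countP_map, hl]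
    have : ((fun line => decide (PySem.Str.len line > 100)) ∘ String.ofList)
        = (fun l : List Char => decide (l.length > 100)) := by
      funext l
      simp [PySem.Str.len]
    rw [List.countP_cons, this]
    have := long_spec s.toList 0 h1 t1 hl
    simp only [Nat.zero_add, decide_eq_true_eq] at this ⊢
    omega
  -- empty-line count
  have hemp : (((PySem.Str.split? s "\n").getD []).foldl
        (fun acc line => if PySem.Str.strip line = "" then acc + 1 else acc) 0)
      = pvEMP s.toList true + (if pvFBL s.toList true then 1 else 0) := by
    rw [foldl_count, hsplit, List.countP_map, hl]
    have hpred : ((fun line => decide (PySem.Str.strip line = "")) ∘ String.ofList)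
        = (fun l : List Char => l.all PySem.Chars.isspace) := by
      funext l
      simp only [Function.comp_apply]
      exact strip_str_eq l
    rw [List.countP_cons, hpred]
    have := emp_spec s.toList true h1 t1 hl
    simp only [Bool.true_and] at this ⊢
    omega
  rw [hwc, hnl, hlong, hemp]
  rw [Nat.add_comm 1 (List.count '\n' s.toList)]
  simp only [List.nil_append, Nat.zero_add]
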